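-- pv_equiv track=rewrite | github.com/galaxyGGG/trials | algorithm/sum1.py | sum_li
-- ===== SOURCE A (Python) =====
-- def sum_li(li_2d):
--     li_2d_out = []
--     for li in li_2d:
--         li_temp = []
--         for i in range(len(li)):
--             val_temp = 0
--             for j in range(i+1):
--                 val_temp += li[j]
--             li_temp.append(val_temp)
--         li_2d_out.append(li_temp)
--     return li_2d_out
-- ===== SOURCE B (Python) =====
-- def sum_li(li_2d):
--     out = []
--     for li in li_2d:
--         acc = 0
--         row = []
--         for x in li:
--             acc += x
--             row.append(acc)
--         out.append(row)
--     return out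
-- ===== Notes on version B (the rewrite author's own statement) =====
-- stated objective: faster
-- what changed: Replaced the per-index inner loop that re-sums the prefix from scratch with a single running accumulator per row.
import Mathlib
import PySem

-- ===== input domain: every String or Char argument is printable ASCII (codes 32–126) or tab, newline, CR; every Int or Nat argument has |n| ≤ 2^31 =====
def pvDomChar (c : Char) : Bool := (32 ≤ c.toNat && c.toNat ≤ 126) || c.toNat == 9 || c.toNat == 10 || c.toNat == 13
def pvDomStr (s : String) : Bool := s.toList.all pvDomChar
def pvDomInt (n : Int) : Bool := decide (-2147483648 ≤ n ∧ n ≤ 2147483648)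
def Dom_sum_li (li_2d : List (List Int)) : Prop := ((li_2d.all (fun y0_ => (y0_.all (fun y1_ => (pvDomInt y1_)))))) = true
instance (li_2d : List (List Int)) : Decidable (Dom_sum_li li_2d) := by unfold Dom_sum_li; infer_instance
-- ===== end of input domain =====

-- B replaces A's quadratic per-row re-summation with a single running-accumulator pass (asymptotically faster).


-- ===== PORT A =====
-- for i in range(len(li)): sum li[j] for j in range(i+1), by an explicit inner loop
def sum_li (li_2d : List (List Int)) : List (List Int) :=
  li_2d.map (fun li =>
    (List.range li.length).map (fun i =>
      (List.range (i + 1)).foldl (fun val_temp j => val_temp + li.getD j 0) 0))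

-- ===== PORT B =====
-- running accumulator: one pass per row
def sumScan (acc : Int) : List Int → List Int
  | [] => []
  | x :: xs => (acc + x) :: sumScan (acc + x) xs

def sum_li_alt (li_2d : List (List Int)) : List (List Int) :=
  li_2d.map (sumScan 0)

-- ===== PRECONDITION & SPEC =====
def Spec_sum_li (li_2d : List (List Int)) (out : List (List Int)) : Prop := out = sum_li_alt li_2d
instance (li_2d : List (List Int)) (out : List (List Int)) : Decidable (Spec_sum_li li_2d out) := by unfold Spec_sum_li; infer_instance

-- ===== CLAIM (what is proved, stated in full; the proofs are below) =====
def Claim_equal_sum_li : Prop := ∀ (li_2d : List (List Int)), Dom_sum_li li_2d → Spec_sum_li li_2d (sum_li li_2d)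

-- ===== LEMMAS AND PROOFS =====

theorem foldl_range_getD (li : List Int) (n : ℕ) (c : Int) (h : n ≤ li.length) :
    (List.range n).foldl (fun a j => a + li.getD j 0) c = c + (li.take n).sum := by
  induction n generalizing c with
  | zero => simp
  | succ n ih =>
    rw [List.range_succ, List.foldl_append]
    rw [ih c (Nat.le_of_succ_le h)]
    have hn : n < li.length := h
    simp [List.sum_take_succ li n hn, List.getElem?_eq_getElem hn]
    ring

theorem sumScan_eq (li : List Int) (acc : Int) :
    sumScan acc li = (List.range li.length).map (fun i => acc + (li.take (i + 1)).sum) := by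
  induction li generalizing acc with
  | nil => simp [sumScan]
  | cons x xs ih =>
    simp only [sumScan, List.length_cons, List.range_succ_eq_map, List.map_cons, List.map_map]
    refine congrArg₂ _ (by simp) ?_
    rw [ih (acc + x)]
    apply List.map_congr_left
    intro i _
    simp [List.take_succ_cons]
    ring

-- ===== VERDICT (by name: the statement is the Claim_ definition above) =====
theorem sum_li_spec : Claim_equal_sum_li := by
  intro li_2d _
  unfold Spec_sum_li sum_li sum_li_alt
  apply List.map_congr_left
  intro li _
  rw [sumScan_eq]
  apply List.map_congr_left
  intro i hi
  rw [foldl_range_getD li (i + 1) 0 (by simpa using List.mem_range.mp hi)]
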